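-- pv_equiv track=rewrite | github.com/austinbeauch/SENG474 | asn3/src/Q1.py | find_dead_ends
-- ===== SOURCE A (Python) =====
-- def find_dead_ends(graph):
--     dead_end = set()
--     dead_end_ordered = []
--
--     # first pass finding all nodes with no outgoing edge
--     order_1 = []
--     for node in graph:
--         if len(graph[node]) == 0 and node not in dead_end:
--             dead_end.add(node)
--             order_1.append(node)
--
--     if len(order_1) > 0:
--         dead_end_ordered.append(order_1)
--
--     while True:
--         updated = False
--
--         # second pass finding all nodes whose outgoing edges are all to dead ends
--         next_removal = []
--         for node in graph:
--             if graph[node].issubset(dead_end) and node not in dead_end: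
--                 updated = True
--                 dead_end.add(node)
--                 next_removal.append(node)
--
--         if not updated:
--             break
--
--         dead_end_ordered.append(next_removal)
--
--     return dead_end_ordered
-- ===== SOURCE B (Python) =====
-- def find_dead_ends(graph):
--     # Kahn-style peeling: reverse adjacency + remaining-successor counts,
--     # scanning only the still-alive nodes each round (in graph order).
--     preds = {n: [] for n in graph}
--     cnt = {}
--     for n in graph:
--         succs = graph[n]
--         cnt[n] = len(succs)
--         for v in succs:
--             if v in preds:
--                 preds[v].append(n)
--
--     first = []
--     remaining = []
--     for n in graph:
--         if cnt[n] == 0: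
--             first.append(n)
--         else:
--             remaining.append(n)
--     for n in first:
--         for p in preds[n]:
--             cnt[p] -= 1
--
--     levels = [first] if first else []
--     while True:
--         level = []
--         rest = []
--         for n in remaining:
--             if cnt[n] == 0:
--                 level.append(n)
--                 for p in preds[n]:
--                     cnt[p] -= 1
--             else:
--                 rest.append(n)
--         if not level:
--             return levels
--         levels.append(level)
--         remaining = rest
-- ===== Notes on version B (the rewrite author's own statement) =====
-- stated objective: alternative
-- what changed: A rescans the whole graph every round and re-tests issubset(successors, dead) per node; B instead builds a reverse adjacency and per-node remaining-successor counts once (Kahn-style), peels levels by testing cnt==0, decrementing predecessor counts as nodes die, and scans only the still-alive nodes each round (it trades A's per-round edge scans for a one-off index build, which does not pay off on graphs that settle in few rounds).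
import Mathlib
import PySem

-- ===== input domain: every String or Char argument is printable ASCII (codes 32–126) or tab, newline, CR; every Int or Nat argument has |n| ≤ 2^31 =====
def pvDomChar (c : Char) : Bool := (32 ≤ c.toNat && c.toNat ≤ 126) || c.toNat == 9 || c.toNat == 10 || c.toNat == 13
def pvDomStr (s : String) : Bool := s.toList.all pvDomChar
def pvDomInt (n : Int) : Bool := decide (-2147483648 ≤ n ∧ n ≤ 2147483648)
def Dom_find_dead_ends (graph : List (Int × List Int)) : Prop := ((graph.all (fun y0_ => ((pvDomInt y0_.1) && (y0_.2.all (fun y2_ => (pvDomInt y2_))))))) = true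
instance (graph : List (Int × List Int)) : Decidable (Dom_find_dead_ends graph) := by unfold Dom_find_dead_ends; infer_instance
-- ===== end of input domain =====

-- B replaces A's repeated full-graph scans with subset tests by Kahn-style peeling:
-- reverse adjacency + remaining-successor counts, scanning only still-alive nodes each round.

-- ===== PORT A =====
-- graph[node]: dict lookup (node is always a key of graph, so the KeyError branch is unreachable)
def pvAdj (graph : List (Int × List Int)) (n : Int) : List Int :=
  (PySem.Dict.mk graph).getD n []

-- the body of A's `while True:` loop; fuel bounds the number of rounds (each round that
-- does not break adds at least one key to dead_end, so graph.length + 1 rounds suffice)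
def pvLoopA (graph : List (Int × List Int)) :
    Nat → PySem.Set Int → List (List Int) → List (List Int)
  | 0, _, acc => acc
  | fuel + 1, dead, acc =>
    let r := (graph.map Prod.fst).foldl
      (fun (st : Bool × PySem.Set Int × List Int) node =>
        if PySem.Set.issubset (pvAdj graph node) st.2.1 && !(PySem.Set.contains st.2.1 node) then
          (true, PySem.Set.add st.2.1 node, st.2.2 ++ [node])
        else st)
      (false, dead, [])
    if !r.1 then acc else pvLoopA graph fuel r.2.1 (acc ++ [r.2.2])

def find_dead_ends (graph : List (Int × List Int)) : List (List Int) :=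
  -- first pass: nodes with no outgoing edge
  let p := (graph.map Prod.fst).foldl
    (fun (st : PySem.Set Int × List Int) node =>
      if (pvAdj graph node).length == 0 && !(PySem.Set.contains st.1 node) then
        (PySem.Set.add st.1 node, st.2 ++ [node])
      else st)
    (PySem.Set.empty, [])
  let acc := if 0 < p.2.length then [p.2] else []
  pvLoopA graph (graph.length + 1) p.1 acc

-- ===== PORT B =====
-- `for p in preds[n]: cnt[p] -= 1` (every p is a key of cnt, so the default 0 is never used)
def pvDec (preds : PySem.Dict Int (List Int)) (cnt : PySem.Dict Int Int) (n : Int) :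
    PySem.Dict Int Int :=
  (preds.getD n []).foldl (fun c p => c.modify p 0 (· - 1)) cnt

-- B's `while True:` loop; same fuel bound as A's (each round that does not return
-- removes at least one node from remaining)
def pvLoopB (preds : PySem.Dict Int (List Int)) :
    Nat → PySem.Dict Int Int → List Int → List (List Int) → List (List Int)
  | 0, _, _, acc => acc
  | fuel + 1, cnt, remaining, acc =>
    let r := remaining.foldl
      (fun (st : PySem.Dict Int Int × List Int × List Int) n =>
        if st.1.getD n 0 == 0 then
          (pvDec preds st.1 n, st.2.1 ++ [n], st.2.2)
        else (st.1, st.2.1, st.2.2 ++ [n]))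
      (cnt, [], [])
    if r.2.1.isEmpty then acc else pvLoopB preds fuel r.1 r.2.2 (acc ++ [r.2.1])

def find_dead_ends_alt (graph : List (Int × List Int)) : List (List Int) :=
  let keys := graph.map Prod.fst
  -- preds = {n: [] for n in graph}
  let preds0 : PySem.Dict Int (List Int) :=
    keys.foldl (fun d n => d.insert n []) PySem.Dict.empty
  -- cnt[n] = len(graph[n]); preds[v].append(n) for each successor v that is a key
  let init := keys.foldl
    (fun (st : PySem.Dict Int Int × PySem.Dict Int (List Int)) n =>
      let succs := pvAdj graph n
      (st.1.insert n (succs.length : Int),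
       succs.foldl (fun p v => if p.contains v then p.modify v [] (· ++ [n]) else p) st.2))
    (PySem.Dict.empty, preds0)
  -- partition into first level (cnt == 0) and remaining
  let part := keys.foldl
    (fun (st : List Int × List Int) n =>
      if init.1.getD n 0 == 0 then (st.1 ++ [n], st.2) else (st.1, st.2 ++ [n]))
    ([], [])
  let cnt1 := part.1.foldl (fun c n => pvDec init.2 c n) init.1
  let levels := if part.1.isEmpty then [] else [part.1]
  pvLoopB init.2 (graph.length + 1) cnt1 part.2 levels

-- ===== PRECONDITION & SPEC =====
-- Pre_ excludes association lists that are not faithful encodings of A's Python argument,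
-- a dict[int, set[int]]: duplicate keys or duplicate elements inside an adjacency list
-- collapse when the Python dict/sets are built, so A's behaviour on such raw lists is undefined.
def Pre_find_dead_ends (graph : List (Int × List Int)) : Prop :=
  (graph.map Prod.fst).Nodup ∧ ∀ p ∈ graph, p.2.Nodup
instance (graph : List (Int × List Int)) : Decidable (Pre_find_dead_ends graph) := by
  unfold Pre_find_dead_ends; infer_instance

def pvWitness_find_dead_ends : (List (Int × List Int)) := [(1, [2]), (2, []), (3, [1, 4])]

def Spec_find_dead_ends (graph : List (Int × List Int)) (out : List (List Int)) : Prop := out = find_dead_ends_alt graph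
instance (graph : List (Int × List Int)) (out : List (List Int)) : Decidable (Spec_find_dead_ends graph out) := by unfold Spec_find_dead_ends; infer_instance

-- ===== CLAIM (what is proved, stated in full; the proofs are below) =====
def Claim_equal_find_dead_ends : Prop := ∀ (graph : List (Int × List Int)), Dom_find_dead_ends graph → Pre_find_dead_ends graph → Spec_find_dead_ends graph (find_dead_ends graph)

-- ===== LEMMAS AND PROOFS =====

-- keys of the graph, in insertion order
def pvK (graph : List (Int × List Int)) : List Int := graph.map Prod.fst

-- invariant: cnt holds, for every key, the number of its successors not yet dead
def pvCntInv (graph : List (Int × List Int)) (dead : List Int)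
    (cnt : PySem.Dict Int Int) : Prop :=
  ∀ n ∈ pvK graph,
    cnt.getD n 0 = (((pvAdj graph n).filter (fun v => !(dead.contains v))).length : Int)

-- characterisation of the reverse-adjacency dict built by B
def pvPredsEq (graph : List (Int × List Int)) (preds : PySem.Dict Int (List Int)) : Prop :=
  ∀ v ∈ pvK graph,
    preds.getD v [] = (pvK graph).filter (fun m => (pvAdj graph m).contains v)

lemma pvAdj_cons (k : Int) (v : List Int) (rest : List (Int × List Int)) (n : Int) :
    pvAdj ((k, v) :: rest) n = if k == n then v else pvAdj rest n := by
  unfold pvAdj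
  rw [PySem.Dict.getD_eq_get?_getD, PySem.Dict.get?_mk_cons]
  split
  · rfl
  · exact (PySem.Dict.getD_eq_get?_getD _ _ _).symm

lemma pvAdj_nodup (graph : List (Int × List Int)) (ha : ∀ p ∈ graph, p.2.Nodup) (n : Int) :
    (pvAdj graph n).Nodup := by
  induction graph with
  | nil => simp [pvAdj, PySem.Dict.getD, PySem.Dict.get?]
  | cons p rest ih =>
    obtain ⟨k, v⟩ := p
    rw [pvAdj_cons]
    split
    · exact ha (k, v) (by simp)
    · exact ih (fun q hq => ha q (by simp [hq]))

-- folding `cnt[p] -= 1` over a duplicate-free list decrements each listed key once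
lemma pvDec_getD (L : List Int) (hnd : L.Nodup) (cnt : PySem.Dict Int Int) (m : Int) :
    (L.foldl (fun c p => c.modify p 0 (· - 1)) cnt).getD m 0
      = cnt.getD m 0 - (if m ∈ L then 1 else 0) := by
  induction L generalizing cnt with
  | nil => simp
  | cons p L ih =>
    rcases List.nodup_cons.mp hnd with ⟨hp, hnd'⟩
    rw [List.foldl_cons, ih hnd', PySem.Dict.getD_modify]
    by_cases hm : m = p
    · subst hm; simp [hp]
    · simp [hm, List.mem_cons]

-- removing one fresh element from dead decreases each affected count by exactly one
lemma pvFilter_len_step (l : List Int) (hl : l.Nodup) (dead : List Int) (k : Int)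
    (hkd : k ∉ dead) :
    ((l.filter (fun v => !((dead ++ [k]).contains v))).length : Int)
      = ((l.filter (fun v => !(dead.contains v))).length : Int) - (if k ∈ l then 1 else 0) := by
  induction l with
  | nil => simp
  | cons a l ih =>
    rcases List.nodup_cons.mp hl with ⟨hal, hnd'⟩
    by_cases hak : a = k
    · subst hak
      have h1 : (!((dead ++ [a]).contains a)) = false := by
        simp [List.contains_eq_mem]
      have h2 : (!(dead.contains a)) = true := by
        simp [List.contains_eq_mem, hkd]
      rw [List.filter_cons, List.filter_cons, h1, h2]
      have hfix : l.filter (fun v => !((dead ++ [a]).contains v))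
          = l.filter (fun v => !(dead.contains v)) := by
        apply List.filter_congr
        intro v hv
        have : v ≠ a := fun h => hal (h ▸ hv)
        simp [List.contains_eq_mem, this]
      rw [hfix]
      simp
    · rw [List.filter_cons, List.filter_cons]
      have hsame : (!((dead ++ [k]).contains a)) = (!(dead.contains a)) := by
        simp [List.contains_eq_mem, hak]
      rw [hsame]
      have hmem : (k ∈ a :: l) ↔ (k ∈ l) := by
        constructor
        · intro h
          rcases List.mem_cons.mp h with h | h
          · exact absurd h.symm hak
          · exact h
        · exact fun h => List.mem_cons_of_mem _ h
      by_cases hc : (!(dead.contains a)) = true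
      · rw [hc]
        simp only [if_pos, List.length_cons, hmem]
        have := ih hnd'
        push_cast
        push_cast at this
        omega
      · simp only [Bool.not_eq_true] at hc
        rw [hc]
        simp only [Bool.false_eq_true, if_neg, not_false_iff, hmem]
        exact ih hnd'
  
-- one node dying preserves the count invariant
lemma pvCntInv_step (graph : List (Int × List Int))
    (ha : ∀ p ∈ graph, p.2.Nodup)
    (preds : PySem.Dict Int (List Int)) (hpreds : pvPredsEq graph preds)
    (hknd : (pvK graph).Nodup)
    (dead : List Int) (cnt : PySem.Dict Int Int) (k : Int)
    (hkK : k ∈ pvK graph) (hkd : k ∉ dead)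
    (hcnt : pvCntInv graph dead cnt) :
    pvCntInv graph (dead ++ [k]) (pvDec preds cnt k) := by
  intro m hm
  have hL : preds.getD k [] = (pvK graph).filter (fun m => (pvAdj graph m).contains k) :=
    hpreds k hkK
  have hLnd : ((pvK graph).filter (fun m => (pvAdj graph m).contains k)).Nodup :=
    hknd.filter _
  unfold pvDec
  rw [hL, pvDec_getD _ hLnd, hcnt m hm,
      pvFilter_len_step _ (pvAdj_nodup graph ha m) dead k hkd]
  have : (m ∈ (pvK graph).filter (fun m => (pvAdj graph m).contains k))
      ↔ k ∈ pvAdj graph m := by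
    simp [List.mem_filter, hm, List.contains_eq_mem]
  by_cases hmem : k ∈ pvAdj graph m
  · rw [if_pos (this.mpr hmem), if_pos hmem]
  · rw [if_neg (fun h => hmem (this.mp h)), if_neg hmem]

-- THE PASS LEMMA: one of A's full scans equals one of B's scans over the alive nodes
lemma pvPass_eq (graph : List (Int × List Int))
    (ha : ∀ p ∈ graph, p.2.Nodup)
    (hknd : (pvK graph).Nodup)
    (preds : PySem.Dict Int (List Int)) (hpreds : pvPredsEq graph preds) :
    ∀ (ks : List Int) (dead : List Int) (cnt : PySem.Dict Int Int) (upd : Bool)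
      (lvl rest : List Int),
      (∀ n ∈ ks, n ∈ pvK graph) → ks.Nodup → dead.Nodup →
      pvCntInv graph dead cnt →
      ∃ (δ : List Int) (cnt' : PySem.Dict Int Int),
        ks.foldl (fun (st : Bool × PySem.Set Int × List Int) node =>
            if PySem.Set.issubset (pvAdj graph node) st.2.1 && !(PySem.Set.contains st.2.1 node) then
              (true, PySem.Set.add st.2.1 node, st.2.2 ++ [node])
            else st) (upd, dead, lvl)
          = (upd || !δ.isEmpty, dead ++ δ, lvl ++ δ)
        ∧ (ks.filter (fun n => !(dead.contains n))).foldl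
            (fun (st : PySem.Dict Int Int × List Int × List Int) n =>
              if st.1.getD n 0 == 0 then
                (pvDec preds st.1 n, st.2.1 ++ [n], st.2.2)
              else (st.1, st.2.1, st.2.2 ++ [n])) (cnt, lvl, rest)
          = (cnt', lvl ++ δ, rest ++ ks.filter (fun n => !((dead ++ δ).contains n)))
        ∧ pvCntInv graph (dead ++ δ) cnt'
        ∧ (∀ n ∈ δ, n ∈ ks) ∧ (dead ++ δ).Nodup := by
  intro ks
  induction ks with
  | nil =>
    intro dead cnt upd lvl rest _ _ hdnd hcnt
    exact ⟨[], cnt, by simp, by simp, by simpa using hcnt, by simp, by simpa using hdnd⟩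
  | cons k ks ih =>
    intro dead cnt upd lvl rest hkK hnd hdnd hcnt
    rcases List.nodup_cons.mp hnd with ⟨hkks, hnd'⟩
    have hkK' : ∀ n ∈ ks, n ∈ pvK graph := fun n hn => hkK n (by simp [hn])
    by_cases hkd : k ∈ dead
    · -- k already dead: A skips it, B's filter drops it
      have hcont : PySem.Set.contains dead k = true := (PySem.Set.contains_iff _ _).mpr hkd
      have hfilt : (!(dead.contains k)) = false := by simp [List.contains_eq_mem, hkd]
      obtain ⟨δ, cnt', hA, hB, hinv, hsub, hnd2⟩ :=
        ih dead cnt upd lvl rest hkK' hnd' hdnd hcnt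
      refine ⟨δ, cnt', ?_, ?_, hinv, fun n hn => by simp [hsub n hn], hnd2⟩
      · rw [List.foldl_cons]
        simp only [hcont, Bool.not_true, Bool.and_false, Bool.false_eq_true, if_neg,
          not_false_iff]
        exact hA
      · rw [List.filter_cons, hfilt]
        simp only [Bool.false_eq_true, if_neg, not_false_iff]
        rw [hB, List.filter_cons]
        have : (!((dead ++ δ).contains k)) = false := by
          simp [List.contains_eq_mem, hkd]
        rw [this]
        simp
    · -- k alive: both sides examine it, with the same test
      have hcont : PySem.Set.contains dead k = false := by
        have := PySem.Set.contains_iff dead k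
        rcases h : PySem.Set.contains dead k with _ | _
        · rfl
        · exact absurd (this.mp h) hkd
      have hfilt : (!(dead.contains k)) = true := by simp [List.contains_eq_mem, hkd]
      have hgd := hcnt k (hkK k (by simp))
      have hcond : (cnt.getD k 0 == 0) = PySem.Set.issubset (pvAdj graph k) dead := by
        rw [hgd]
        have h1 : ((((pvAdj graph k).filter (fun v => !(dead.contains v))).length : Int) == 0)
            = true ↔ ∀ v ∈ pvAdj graph k, v ∈ dead := by
          simp [beq_iff_eq, List.filter_eq_nil_iff, List.contains_eq_mem]
        have h2 := PySem.Set.issubset_iff (pvAdj graph k) dead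
        rcases h : PySem.Set.issubset (pvAdj graph k) dead with _ | _
        · rcases hx : ((((pvAdj graph k).filter (fun v => !(dead.contains v))).length : Int) == 0) with _ | _
          · rfl
          · exact absurd (h2.mpr (h1.mp hx)) (by simp [h])
        · exact h1.mpr (h2.mp h)
      by_cases hdie : PySem.Set.issubset (pvAdj graph k) dead = true
      · -- k dies on both sides
        have hadd : PySem.Set.add dead k = dead ++ [k] := PySem.Set.add_of_not_mem hkd
        have hdnd1 : (dead ++ [k]).Nodup := by
          simp [List.nodup_append, hdnd]
          exact fun a hadead hk => hkd (hk ▸ hadead)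
        have hcnt1 : pvCntInv graph (dead ++ [k]) (pvDec preds cnt k) :=
          pvCntInv_step graph ha preds hpreds hknd dead cnt k (hkK k (by simp)) hkd hcnt
        obtain ⟨δ, cnt', hA, hB, hinv, hsub, hnd2⟩ :=
          ih (dead ++ [k]) (pvDec preds cnt k) true (lvl ++ [k]) rest hkK' hnd' hdnd1 hcnt1
        refine ⟨k :: δ, cnt', ?_, ?_, ?_, ?_, ?_⟩
        · rw [List.foldl_cons]
          simp only [hdie, hcont, Bool.not_false, Bool.and_true, if_pos, hadd]
          rw [hA]
          simp [List.append_assoc]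
        · rw [List.filter_cons, hfilt]
          simp only [if_pos]
          rw [List.foldl_cons]
          simp only [hcond, hdie, if_pos]
          have hfix : ks.filter (fun n => !(dead.contains n))
              = ks.filter (fun n => !((dead ++ [k]).contains n)) := by
            apply List.filter_congr
            intro v hv
            have : v ≠ k := fun h => hkks (h ▸ hv)
            simp [List.contains_eq_mem, this]
          rw [hfix, hB]
          have hdrop : (!((dead ++ k :: δ).contains k)) = false := by
            simp [List.contains_eq_mem]
          rw [List.filter_cons, hdrop]
          simp [List.append_assoc]
        · simpa [List.append_assoc] using hinv
        · intro n hn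
          rcases List.mem_cons.mp hn with h | h
          · simp [h]
          · simp [hsub n h]
        · simpa [List.append_assoc] using hnd2
      · -- k survives on both sides
        have hdie' : PySem.Set.issubset (pvAdj graph k) dead = false := by
          rcases h : PySem.Set.issubset (pvAdj graph k) dead with _ | _
          · rfl
          · exact absurd h hdie
        obtain ⟨δ, cnt', hA, hB, hinv, hsub, hnd2⟩ :=
          ih dead cnt upd lvl (rest ++ [k]) hkK' hnd' hdnd hcnt
        have hkδ : k ∉ δ := fun h => hkks (hsub k h)
        refine ⟨δ, cnt', ?_, ?_, hinv, fun n hn => by simp [hsub n hn], hnd2⟩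
        · rw [List.foldl_cons]
          simp only [hdie', Bool.false_and, Bool.false_eq_true, if_neg, not_false_iff]
          exact hA
        · rw [List.filter_cons, hfilt]
          simp only [if_pos]
          rw [List.foldl_cons]
          simp only [hcond, hdie', Bool.false_eq_true, if_neg, not_false_iff]
          rw [hB]
          have hkeep : (!((dead ++ δ).contains k)) = true := by
            simp [List.contains_eq_mem, hkd, hkδ]
          rw [List.filter_cons, hkeep]
          simp [List.append_assoc]
  
-- THE LOOP LEMMA: the two while-loops agree round by round
lemma pvLoop_eq (graph : List (Int × List Int))
    (ha : ∀ p ∈ graph, p.2.Nodup)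
    (hknd : (pvK graph).Nodup)
    (preds : PySem.Dict Int (List Int)) (hpreds : pvPredsEq graph preds) :
    ∀ (fuel : Nat) (dead : List Int) (cnt : PySem.Dict Int Int) (acc : List (List Int)),
      dead.Nodup → pvCntInv graph dead cnt →
      pvLoopA graph fuel dead acc
        = pvLoopB preds fuel cnt ((pvK graph).filter (fun n => !(dead.contains n))) acc := by
  intro fuel
  induction fuel with
  | zero => intro dead cnt acc _ _; rfl
  | succ fuel ih =>
    intro dead cnt acc hdnd hcnt
    obtain ⟨δ, cnt', hA, hB, hinv, _, hnd2⟩ :=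
      pvPass_eq graph ha hknd preds hpreds (pvK graph) dead cnt false [] []
        (fun n hn => hn) hknd hdnd hcnt
    simp only [pvK] at hA hB hinv hnd2
    simp only [pvLoopA, pvLoopB, pvK]
    rw [hA, hB]
    rcases hδ : δ with _ | ⟨d0, δ'⟩
    · subst hδ; simp
    · subst hδ
      simp only [List.isEmpty_cons, List.nil_append, Bool.not_false, Bool.or_true,
        Bool.not_true, Bool.false_eq_true, if_neg, not_false_iff]
      have hrec := ih (dead ++ d0 :: δ') cnt' (acc ++ [d0 :: δ']) hnd2 hinv
      simp only [pvK] at hrec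
      exact hrec

-- A's first pass collects exactly the keys with empty adjacency, into both components
lemma pvFirstA (graph : List (Int × List Int)) :
    ∀ (ks : List Int) (d o : List Int), ks.Nodup → (∀ n ∈ ks, n ∉ d) →
      ks.foldl (fun (st : PySem.Set Int × List Int) node =>
          if (pvAdj graph node).length == 0 && !(PySem.Set.contains st.1 node) then
            (PySem.Set.add st.1 node, st.2 ++ [node])
          else st) (d, o)
        = (d ++ ks.filter (fun n => (pvAdj graph n).length == 0),
           o ++ ks.filter (fun n => (pvAdj graph n).length == 0)) := by
  intro ks
  induction ks with
  | nil => intro d o _ _; simp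
  | cons k ks ih =>
    intro d o hnd hfresh
    rcases List.nodup_cons.mp hnd with ⟨hkks, hnd'⟩
    have hkd : k ∉ d := hfresh k (by simp)
    have hcont : PySem.Set.contains d k = false := by
      rcases h : PySem.Set.contains d k with _ | _
      · rfl
      · exact absurd ((PySem.Set.contains_iff _ _).mp h) hkd
    rw [List.foldl_cons, List.filter_cons]
    by_cases hlen : ((pvAdj graph k).length == 0) = true
    · have hadd : PySem.Set.add d k = d ++ [k] := PySem.Set.add_of_not_mem hkd
      simp only [hlen, hcont, Bool.not_false, Bool.and_true, if_pos, hadd]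
      rw [ih (d ++ [k]) (o ++ [k]) hnd'
        (fun n hn => by
          simp only [List.mem_append, List.mem_singleton]
          rintro (h | h)
          · exact hfresh n (by simp [hn]) h
          · exact hkks (h ▸ hn))]
      simp [List.append_assoc]
    · have hlen' : ((pvAdj graph k).length == 0) = false := by
        rcases h : ((pvAdj graph k).length == 0) with _ | _
        · rfl
        · exact absurd h hlen
      simp only [hlen', Bool.false_and, Bool.false_eq_true, if_neg, not_false_iff]
      rw [ih d o hnd' (fun n hn => hfresh n (by simp [hn]))]

-- a fold over a pair whose components evolve independently splits
lemma pvFoldPair {α β γ : Type} (ks : List γ) (F : α → γ → α) (G : β → γ → β)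
    (a : α) (b : β) :
    ks.foldl (fun (st : α × β) n => (F st.1 n, G st.2 n)) (a, b)
      = (ks.foldl F a, ks.foldl G b) := by
  induction ks generalizing a b with
  | nil => rfl
  | cons k ks ih => simp [List.foldl_cons, ih]

-- the cnt-building fold: value of a key is its adjacency length
lemma pvCnt0_getD (graph : List (Int × List Int)) :
    ∀ (ks : List Int) (d : PySem.Dict Int Int) (m : Int),
      (ks.foldl (fun c n => c.insert n ((pvAdj graph n).length : Int)) d).getD m 0
        = if m ∈ ks then ((pvAdj graph m).length : Int) else d.getD m 0 := by
  intro ks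
  induction ks with
  | nil => simp
  | cons k ks ih =>
    intro d m
    rw [List.foldl_cons, ih]
    by_cases hm : m ∈ ks
    · simp [hm, List.mem_cons]
    · by_cases hmk : m = k
      · subst hmk
        simp [hm]
      · simp [hm, hmk, PySem.Dict.getD_insert]

-- the preds0 dict: domain = keys, all values []
lemma pvPreds0_contains (ks : List Int) (d : PySem.Dict Int (List Int)) (v : Int) :
    (ks.foldl (fun d n => d.insert n ([] : List Int)) d).contains v
      = (d.contains v || decide (v ∈ ks)) := by
  induction ks generalizing d with
  | nil => simp
  | cons k ks ih =>
    rw [List.foldl_cons, ih, PySem.Dict.contains_insert]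
    by_cases h : v = k
    · simp [h, List.mem_cons]
    · have hb : (v == k) = false := beq_eq_false_iff_ne.mpr h
      simp [hb, h, List.mem_cons]

lemma pvPreds0_getD (ks : List Int) (d : PySem.Dict Int (List Int)) (v : Int)
    (hd : d.getD v [] = []) :
    (ks.foldl (fun d n => d.insert n ([] : List Int)) d).getD v [] = [] := by
  induction ks generalizing d with
  | nil => exact hd
  | cons k ks ih =>
    rw [List.foldl_cons]
    apply ih
    rw [PySem.Dict.getD_insert]
    split <;> simp [hd]

-- inner fold of the preds build: appends n once to each distinct successor that is a key
lemma pvPredsInner (K : List Int) (s : List Int) (hs : s.Nodup) (n : Int) :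
    ∀ (pd : PySem.Dict Int (List Int)),
      (∀ v, pd.contains v = decide (v ∈ K)) →
      (∀ v, (s.foldl (fun p v => if p.contains v then p.modify v [] (· ++ [n]) else p) pd).contains v
          = decide (v ∈ K))
      ∧ ∀ v, (s.foldl (fun p v => if p.contains v then p.modify v [] (· ++ [n]) else p) pd).getD v []
          = pd.getD v [] ++ (if v ∈ s ∧ v ∈ K then [n] else []) := by
  induction s with
  | nil => intro pd hc; exact ⟨hc, fun v => by simp⟩
  | cons u s ih =>
    intro pd hc
    rcases List.nodup_cons.mp hs with ⟨hus, hnd'⟩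
    by_cases huK : u ∈ K
    · have hcu : pd.contains u = true := by simp [hc, huK]
      have hc' : ∀ v, (pd.modify u [] (· ++ [n])).contains v = decide (v ∈ K) := by
        intro v
        rw [PySem.Dict.contains_modify]
        by_cases h : v = u <;> simp [h, hc, huK]
      obtain ⟨hc2, hg2⟩ := ih hnd' (pd.modify u [] (· ++ [n])) hc'
      constructor
      · intro v
        rw [List.foldl_cons]
        simp only [hcu, if_pos]
        exact hc2 v
      · intro v
        rw [List.foldl_cons]
        simp only [hcu, if_pos]
        rw [hg2 v, PySem.Dict.getD_modify]
        by_cases hvu : v = u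
        · subst hvu
          simp [hus, huK]
        · simp [hvu, List.mem_cons]
    · have hcu : pd.contains u = false := by simp [hc, huK]
      obtain ⟨hc2, hg2⟩ := ih hnd' pd hc
      constructor
      · intro v
        rw [List.foldl_cons]
        simp only [hcu, Bool.false_eq_true, if_neg, not_false_iff]
        exact hc2 v
      · intro v
        rw [List.foldl_cons]
        simp only [hcu, Bool.false_eq_true, if_neg, not_false_iff]
        rw [hg2 v]
        by_cases hvu : v = u
        · subst hvu; simp [huK]
        · simp [hvu, List.mem_cons]

-- outer fold of the preds build
lemma pvPredsOuter (graph : List (Int × List Int)) (ha : ∀ p ∈ graph, p.2.Nodup)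
    (K : List Int) :
    ∀ (ks : List Int) (pd : PySem.Dict Int (List Int)),
      (∀ v, pd.contains v = decide (v ∈ K)) →
      ∀ v ∈ K,
        (ks.foldl (fun p m => (pvAdj graph m).foldl
            (fun p v => if p.contains v then p.modify v [] (· ++ [m]) else p) p) pd).getD v []
          = pd.getD v [] ++ ks.filter (fun m => (pvAdj graph m).contains v) := by
  intro ks
  induction ks with
  | nil => intro pd _ v _; simp
  | cons m ks ih =>
    intro pd hc v hvK
    obtain ⟨hc2, hg2⟩ := pvPredsInner K (pvAdj graph m) (pvAdj_nodup graph ha m) m pd hc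
    rw [List.foldl_cons, ih _ hc2 v hvK, hg2 v, List.filter_cons]
    by_cases hmem : v ∈ pvAdj graph m
    · have : ((pvAdj graph m).contains v) = true := by simp [List.contains_eq_mem, hmem]
      rw [this]
      simp [hmem, hvK, List.append_assoc]
    · have : ((pvAdj graph m).contains v) = false := by simp [List.contains_eq_mem, hmem]
      rw [this]
      simp [hmem]

-- the partition fold splits keys by the test
lemma pvPartition (q : Int → Bool) :
    ∀ (ks : List Int) (a b : List Int),
      ks.foldl (fun (st : List Int × List Int) n =>
          if q n then (st.1 ++ [n], st.2) else (st.1, st.2 ++ [n])) (a, b)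
        = (a ++ ks.filter q, b ++ ks.filter (fun n => !(q n))) := by
  intro ks
  induction ks with
  | nil => intro a b; simp
  | cons k ks ih =>
    intro a b
    rw [List.foldl_cons, List.filter_cons, List.filter_cons]
    by_cases h : q k = true
    · simp only [h, if_pos, Bool.not_true, Bool.false_eq_true, not_false_iff, if_neg]
      rw [ih]
      simp [List.append_assoc]
    · have h' : q k = false := by
        rcases hq : q k with _ | _
        · rfl
        · exact absurd hq h
      simp only [h', Bool.false_eq_true, if_neg, not_false_iff, Bool.not_false, if_pos]
      rw [ih]
      simp [List.append_assoc]

-- iterating the decrement over a whole level preserves the count invariant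
lemma pvCntInv_level (graph : List (Int × List Int))
    (ha : ∀ p ∈ graph, p.2.Nodup)
    (preds : PySem.Dict Int (List Int)) (hpreds : pvPredsEq graph preds)
    (hknd : (pvK graph).Nodup) :
    ∀ (L : List Int) (dead : List Int) (cnt : PySem.Dict Int Int),
      L.Nodup → (∀ n ∈ L, n ∈ pvK graph ∧ n ∉ dead) →
      pvCntInv graph dead cnt →
      pvCntInv graph (dead ++ L) (L.foldl (fun c n => pvDec preds c n) cnt) := by
  intro L
  induction L with
  | nil => intro dead cnt _ _ h; simpa using h
  | cons k L ih =>
    intro dead cnt hnd hK hcnt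
    rcases List.nodup_cons.mp hnd with ⟨hkL, hnd'⟩
    obtain ⟨hkK, hkd⟩ := hK k (by simp)
    have h1 := pvCntInv_step graph ha preds hpreds hknd dead cnt k hkK hkd hcnt
    have h2 := ih (dead ++ [k]) (pvDec preds cnt k) hnd'
      (fun n hn => ⟨(hK n (by simp [hn])).1, by
        simp only [List.mem_append, List.mem_singleton]
        rintro (h | h)
        · exact (hK n (by simp [hn])).2 h
        · exact hkL (h ▸ hn)⟩) h1
    rw [List.foldl_cons]
    simpa [List.append_assoc] using h2

-- ===== VERDICT (by name: the statement is the Claim_ definition above) =====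
theorem find_dead_ends_spec : Claim_equal_find_dead_ends := by
  intro graph _ hpre
  obtain ⟨hknd, ha⟩ := hpre
  unfold Spec_find_dead_ends
  have hknd' : (pvK graph).Nodup := hknd
  set sinks := (graph.map Prod.fst).filter (fun n => (pvAdj graph n).length == 0) with hsinks
  set cnt0 := (graph.map Prod.fst).foldl
      (fun c n => c.insert n (((pvAdj graph n).length : Int))) PySem.Dict.empty with hcnt0def
  set preds0 := (graph.map Prod.fst).foldl
      (fun d n => d.insert n ([] : List Int)) PySem.Dict.empty with hpreds0def
  set preds := (graph.map Prod.fst).foldl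
      (fun p m => (pvAdj graph m).foldl
        (fun p v => if p.contains v then p.modify v [] (· ++ [m]) else p) p) preds0
    with hpredsdef
  -- A's first pass produces the sink level
  have hA : find_dead_ends graph
      = pvLoopA graph (graph.length + 1) sinks (if 0 < sinks.length then [sinks] else []) := by
    simp only [find_dead_ends]
    rw [show (PySem.Set.empty : PySem.Set Int) = ([] : List Int) from rfl,
      pvFirstA graph (graph.map Prod.fst) [] [] hknd (by intro n _; exact List.not_mem_nil)]
    simp only [List.nil_append]
    rfl
  -- B's initialisation
  have hc0 : ∀ v, preds0.contains v = decide (v ∈ graph.map Prod.fst) := by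
    intro v
    rw [hpreds0def, pvPreds0_contains]
    simp
  have hpredsEq : pvPredsEq graph preds := by
    intro v hv
    have h0 : preds0.getD v [] = [] := by
      rw [hpreds0def]
      exact pvPreds0_getD _ _ _ (by simp)
    rw [hpredsdef, pvPredsOuter graph ha (graph.map Prod.fst) (graph.map Prod.fst) preds0 hc0 v hv,
      h0]
    simp [pvK]
  have hcnt0 : ∀ m ∈ graph.map Prod.fst, cnt0.getD m 0 = ((pvAdj graph m).length : Int) := by
    intro m hm
    rw [hcnt0def, pvCnt0_getD]
    simp [hm]
  have hcntInv0 : pvCntInv graph [] cnt0 := by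
    intro m hm
    rw [hcnt0 m hm]
    simp
  have hsinksNodup : sinks.Nodup := hknd.filter _
  have hbeq : ∀ n ∈ graph.map Prod.fst,
      (cnt0.getD n 0 == 0) = ((pvAdj graph n).length == 0) := by
    intro n hn
    rw [hcnt0 n hn]
    by_cases hl : (pvAdj graph n).length = 0 <;> simp [hl]
  have hq : (graph.map Prod.fst).filter (fun n => (cnt0.getD n 0 == 0)) = sinks :=
    List.filter_congr hbeq
  have hrem : (graph.map Prod.fst).filter (fun n => !(cnt0.getD n 0 == 0))
      = (graph.map Prod.fst).filter (fun n => !(sinks.contains n)) := by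
    apply List.filter_congr
    intro n hn
    have h2 : sinks.contains n = ((pvAdj graph n).length == 0) := by
      by_cases hmem : n ∈ sinks
      · have := (List.mem_filter.mp (hsinks ▸ hmem)).2
        simp [List.contains_eq_mem, hmem, this]
      · have hlen : ((pvAdj graph n).length == 0) = false := by
          rcases h : ((pvAdj graph n).length == 0) with _ | _
          · rfl
          · exact absurd (hsinks ▸ List.mem_filter.mpr ⟨hn, h⟩) hmem
        simp [List.contains_eq_mem, hmem, hlen]
    rw [hbeq n hn, h2]
  have hcnt1Inv : pvCntInv graph sinks
      (sinks.foldl (fun c n => pvDec preds c n) cnt0) := by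
    have := pvCntInv_level graph ha preds hpredsEq hknd' sinks [] cnt0 hsinksNodup
      (fun n hn => ⟨(List.mem_filter.mp (hsinks ▸ hn)).1, List.not_mem_nil⟩) hcntInv0
    simpa using this
  -- B reduces to the loop
  have hB : find_dead_ends_alt graph
      = pvLoopB preds (graph.length + 1)
          (sinks.foldl (fun c n => pvDec preds c n) cnt0)
          ((graph.map Prod.fst).filter (fun n => !(sinks.contains n)))
          (if 0 < sinks.length then [sinks] else []) := by
    simp only [find_dead_ends_alt]
    rw [pvFoldPair (graph.map Prod.fst)
        (fun c n => c.insert n (((pvAdj graph n).length : Int)))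
        (fun p m => (pvAdj graph m).foldl
          (fun p v => if p.contains v then p.modify v [] (· ++ [m]) else p) p)
        PySem.Dict.empty preds0]
    rw [pvPartition (fun n => (cnt0.getD n 0 == 0)) (graph.map Prod.fst) [] []]
    simp only [List.nil_append, ← hcnt0def, ← hpredsdef, hq, hrem]
    have hacc : (if sinks.isEmpty then ([] : List (List Int)) else [sinks])
        = (if 0 < sinks.length then [sinks] else []) := by
      cases sinks <;> simp
    rw [hacc]
  rw [hA, hB]
  have := pvLoop_eq graph ha hknd' preds hpredsEq (graph.length + 1) sinks
    (sinks.foldl (fun c n => pvDec preds c n) cnt0)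
    (if 0 < sinks.length then [sinks] else []) hsinksNodup hcnt1Inv
  simpa [pvK] using this
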